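-- pv_equiv track=rewrite | github.com/PrometheosFire/foraging-sim | env/spatial_grid.py | _generate_circle_offsets
-- ===== SOURCE A (Python) =====
-- def _generate_circle_offsets(range_cells):
--     """Generate cell offsets by ring level (level 0 first, then 1, 2...)"""
--     seen = set()
--     levels = []
--     for r in range(range_cells + 1):
--         level = []
--         for dx in range(-r, r + 1):
--             for dy in range(-r, r + 1):
--                 if max(abs(dx), abs(dy)) == r and (dx, dy) not in seen:
--                     seen.add((dx, dy))
--                     level.append((dx, dy))
--         levels.append(level)
--     return levels
-- ===== SOURCE B (Python) =====
-- def _generate_circle_offsets(range_cells):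
--     """Emit each Chebyshev ring's boundary cells directly (no full-square scan, no seen set)."""
--     levels = []
--     for r in range(range_cells + 1):
--         if r == 0:
--             levels.append([(0, 0)])
--             continue
--         level = [(-r, dy) for dy in range(-r, r + 1)]
--         for dx in range(-r + 1, r):
--             level.append((dx, -r))
--             level.append((dx, r))
--         level += [(r, dy) for dy in range(-r, r + 1)]
--         levels.append(level)
--     return levels
-- ===== Notes on version B (the rewrite author's own statement) =====
-- stated objective: faster
-- what changed: B emits each Chebyshev ring's boundary cells directly (left column, middle top/bottom pairs, right column) instead of scanning the full (2r+1)x(2r+1) square per ring with a global 'seen' set.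
import Mathlib
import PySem

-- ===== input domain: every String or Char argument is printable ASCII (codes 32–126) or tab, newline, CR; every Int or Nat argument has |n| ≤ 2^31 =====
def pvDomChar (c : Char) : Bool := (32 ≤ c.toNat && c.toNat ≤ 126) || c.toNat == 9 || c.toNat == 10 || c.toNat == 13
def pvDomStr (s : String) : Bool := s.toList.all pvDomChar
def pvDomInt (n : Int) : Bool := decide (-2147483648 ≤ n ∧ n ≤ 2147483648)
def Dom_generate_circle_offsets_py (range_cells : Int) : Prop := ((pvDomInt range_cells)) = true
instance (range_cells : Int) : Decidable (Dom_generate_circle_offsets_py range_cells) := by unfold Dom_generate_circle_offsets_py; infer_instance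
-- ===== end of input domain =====

-- B emits each Chebyshev ring's boundary cells directly instead of A's per-ring full-square scan with a 'seen' set; measured asymptotically faster.

-- ===== PORT A =====
-- literal transliteration of A: state = (seen : PySem.Set, levels); full (2r+1)×(2r+1) scan per ring
def generate_circle_offsets_py (range_cells : Int) : List (List (Int × Int)) :=
  let res := (PySem.List.pyRange 0 (range_cells + 1) 1).foldl
    (fun st r =>
      let inner := (PySem.List.pyRange (-r) (r + 1) 1).foldl
        (fun st2 dx =>
          (PySem.List.pyRange (-r) (r + 1) 1).foldl
            (fun st3 dy =>
              if max |dx| |dy| = r ∧ (dx, dy) ∉ st3.1 then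
                (PySem.Set.add st3.1 (dx, dy), st3.2 ++ [(dx, dy)])
              else st3)
            st2)
        ((st.1 : PySem.Set (Int × Int)), ([] : List (Int × Int)))
      (inner.1, st.2 ++ [inner.2]))
    ((PySem.Set.empty : PySem.Set (Int × Int)), ([] : List (List (Int × Int))))
  res.2

-- ===== PORT B =====
-- literal transliteration of B: per ring, left column ++ middle top/bottom pairs ++ right column
def generate_circle_offsets_py_alt (range_cells : Int) : List (List (Int × Int)) :=
  (PySem.List.pyRange 0 (range_cells + 1) 1).foldl
    (fun levels r =>
      if r = 0 then levels ++ [[((0 : Int), (0 : Int))]]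
      else
        let level0 := (PySem.List.pyRange (-r) (r + 1) 1).map (fun dy => (-r, dy))
        let level1 := (PySem.List.pyRange (-r + 1) r 1).foldl
          (fun lv dx => (lv ++ [(dx, -r)]) ++ [(dx, r)]) level0
        let level := level1 ++ (PySem.List.pyRange (-r) (r + 1) 1).map (fun dy => (r, dy))
        levels ++ [level])
    []

-- ===== PRECONDITION & SPEC =====
def Spec_generate_circle_offsets_py (range_cells : Int) (out : List (List (Int × Int))) : Prop := out = generate_circle_offsets_py_alt range_cells
instance (range_cells : Int) (out : List (List (Int × Int))) : Decidable (Spec_generate_circle_offsets_py range_cells out) := by unfold Spec_generate_circle_offsets_py; infer_instance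

-- ===== CLAIM (what is proved, stated in full; the proofs are below) =====
def Claim_equal_generate_circle_offsets_py : Prop := ∀ (range_cells : Int), Dom_generate_circle_offsets_py range_cells → Spec_generate_circle_offsets_py range_cells (generate_circle_offsets_py range_cells)

-- ===== LEMMAS AND PROOFS =====

lemma pv_abs (x : Int) : |x| = (x.natAbs : Int) := by
  by_cases hx : 0 ≤ x
  · rw [abs_of_nonneg hx]; omega
  · rw [abs_of_neg (by omega)]; omega

-- B's per-ring list, in closed form
def pvRing (r : Int) : List (Int × Int) :=
  if r = 0 then [((0 : Int), (0 : Int))]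
  else
    (PySem.List.pyRange (-r) (r + 1) 1).map (fun dy => (-r, dy))
    ++ ((PySem.List.pyRange (-r + 1) r 1).flatMap (fun dx => [(dx, -r), (dx, r)])
    ++ (PySem.List.pyRange (-r) (r + 1) 1).map (fun dy => (r, dy)))

-- A's innermost (dy) step
def pvStep (r dx : Int) (st3 : PySem.Set (Int × Int) × List (Int × Int)) (dy : Int) :
    PySem.Set (Int × Int) × List (Int × Int) :=
  if max |dx| |dy| = r ∧ (dx, dy) ∉ st3.1 then
    (PySem.Set.add st3.1 (dx, dy), st3.2 ++ [(dx, dy)])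
  else st3

-- A's per-dx step (one full dy scan)
def pvRStep (r : Int) (st2 : PySem.Set (Int × Int) × List (Int × Int)) (dx : Int) :
    PySem.Set (Int × Int) × List (Int × Int) :=
  (PySem.List.pyRange (-r) (r + 1) 1).foldl (pvStep r dx) st2

lemma pvRing_mem (r : Int) (hr : 0 ≤ r) (a b : Int) :
    (a, b) ∈ pvRing r ↔ max |a| |b| = r := by
  rcases eq_or_ne r 0 with h0 | h0
  · subst h0
    constructor
    · intro hm
      have h00 : (a, b) = ((0 : Int), (0 : Int)) := by simpa [pvRing] using hm
      injection h00 with hx hy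
      subst hx; subst hy; simp
    · intro hm
      have hab : a = 0 ∧ b = 0 := by
        simp only [pv_abs] at hm
        constructor <;> omega
      simp [pvRing, hab.1, hab.2]
  · simp only [pvRing, if_neg h0, List.mem_append, List.mem_map, List.mem_flatMap,
      PySem.List.mem_pyRange_one, List.mem_cons, List.not_mem_nil,
      or_false, Prod.mk.injEq]
    constructor
    · rintro (⟨dy, ⟨hd1, hd2⟩, he1, he2⟩ | ⟨dx, ⟨hd1, hd2⟩, (⟨he1, he2⟩ | ⟨he1, he2⟩)⟩ |
        ⟨dy, ⟨hd1, hd2⟩, he1, he2⟩) <;> simp only [pv_abs] at * <;> omega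
    · intro h
      simp only [pv_abs] at h
      rcases eq_or_ne a (-r) with ha | ha
      · exact Or.inl ⟨b, by omega, by omega, rfl⟩
      · rcases eq_or_ne a r with ha2 | ha2
        · exact Or.inr (Or.inr ⟨b, by omega, by omega, rfl⟩)
        · rcases eq_or_ne b r with hb | hb
          · exact Or.inr (Or.inl ⟨a, by omega, Or.inr ⟨rfl, by omega⟩⟩)
          · exact Or.inr (Or.inl ⟨a, by omega, Or.inl ⟨rfl, by omega⟩⟩)

lemma pv_max_ne (r dx : Int) (ds : List Int)
    (h : ∀ dy ∈ ds, max |dx| |dy| ≠ r) (st : PySem.Set (Int × Int) × List (Int × Int)) :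
    ds.foldl (pvStep r dx) st = st := by
  induction ds generalizing st with
  | nil => rfl
  | cons d ds ih =>
    simp only [List.foldl_cons]
    rw [show pvStep r dx st d = st by simp [pvStep, h d (by simp)]]
    exact ih (fun dy hdy => h dy (by simp [hdy])) st

lemma pv_dy_all (r dx : Int) (hdx : |dx| = r) :
    ∀ (ds : List Int) (seen : PySem.Set (Int × Int)) (level : List (Int × Int)),
      (∀ dy ∈ ds, |dy| ≤ r) → (∀ dy ∈ ds, (dx, dy) ∉ seen) → ds.Nodup →
      ds.foldl (pvStep r dx) (seen, level)
        = (seen ++ ds.map (fun dy => (dx, dy)), level ++ ds.map (fun dy => (dx, dy))) := by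
  intro ds
  induction ds with
  | nil => intro seen level _ _ _; simp
  | cons d ds ih =>
    intro seen level hle hnm hnd
    simp only [List.foldl_cons]
    have hd : (dx, d) ∉ seen := hnm d (by simp)
    have hc : pvStep r dx (seen, level) d = (seen ++ [(dx, d)], level ++ [(dx, d)]) := by
      have hcond : max |dx| |d| = r ∧ (dx, d) ∉ seen :=
        ⟨by have := hle d (by simp); omega, hd⟩
      simp only [pvStep, if_pos hcond]
      simp [PySem.Set.add, hd]
    rw [hc, ih (seen ++ [(dx, d)]) (level ++ [(dx, d)])
        (fun dy h => hle dy (by simp [h]))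
        (fun dy h hmem => by
          rcases List.mem_append.mp hmem with h1 | h1
          · exact hnm dy (List.mem_cons_of_mem _ h) h1
          · have h1' := List.mem_singleton.mp h1
            injection h1' with hx hy
            exact (List.nodup_cons.mp hnd).1 (hy ▸ h))
        (List.nodup_cons.mp hnd).2]
    simp

lemma pv_dy_mid (r dx : Int) (hr : 1 ≤ r) (hdx : |dx| < r)
    (seen : PySem.Set (Int × Int)) (level : List (Int × Int))
    (h1 : (dx, -r) ∉ seen) (h2 : (dx, r) ∉ seen) :
    (PySem.List.pyRange (-r) (r + 1) 1).foldl (pvStep r dx) (seen, level)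
      = (seen ++ [(dx, -r), (dx, r)], level ++ [(dx, -r), (dx, r)]) := by
  have e : PySem.List.pyRange (-r) (r + 1) 1
      = [-r] ++ PySem.List.pyRange (-r + 1) r 1 ++ [r] := by
    rw [PySem.List.pyRange_one_succ_right (by omega), PySem.List.pyRange_one_cons (by omega)]
    simp
  rw [e, List.foldl_append, List.foldl_append]
  have s1 : List.foldl (pvStep r dx) (seen, level) [-r]
      = (seen ++ [(dx, -r)], level ++ [(dx, -r)]) := by
    have hcond : max |dx| |(-r)| = r ∧ (dx, -r) ∉ seen :=
      ⟨by simp only [pv_abs] at hdx ⊢; omega, h1⟩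
    simp only [List.foldl_cons, List.foldl_nil, pvStep, if_pos hcond]
    simp [PySem.Set.add, h1]
  rw [s1, pv_max_ne r dx (PySem.List.pyRange (-r + 1) r 1) (fun dy hdy => by
      have := PySem.List.mem_pyRange_one.mp hdy
      simp only [pv_abs] at hdx ⊢; omega)]
  have hcond2 : max |dx| |r| = r ∧ (dx, r) ∉ seen ++ [(dx, -r)] := by
    refine ⟨by simp only [pv_abs] at hdx ⊢; omega, fun hmem => ?_⟩
    rcases List.mem_append.mp hmem with h | h
    · exact h2 h
    · have h' := List.mem_singleton.mp h
      injection h' with hx hy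
      omega
  simp only [List.foldl_cons, List.foldl_nil, pvStep, if_pos hcond2]
  simp [PySem.Set.add, hcond2.2]

lemma pv_mid_fold (r : Int) (hr : 1 ≤ r) :
    ∀ (ds : List Int), ds.Nodup → (∀ dx ∈ ds, |dx| < r) →
      ∀ (seen : PySem.Set (Int × Int)) (level : List (Int × Int)),
        (∀ dx ∈ ds, (dx, -r) ∉ seen ∧ (dx, r) ∉ seen) →
        ds.foldl (pvRStep r) (seen, level)
          = (seen ++ ds.flatMap (fun dx => [(dx, -r), (dx, r)]),
             level ++ ds.flatMap (fun dx => [(dx, -r), (dx, r)])) := by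
  intro ds
  induction ds with
  | nil => intro _ _ seen level _; simp
  | cons d ds ih =>
    intro hnd hlt seen level hnm
    simp only [List.foldl_cons]
    rw [show pvRStep r (seen, level) d = (seen ++ [(d, -r), (d, r)], level ++ [(d, -r), (d, r)]) from
      pv_dy_mid r d hr (hlt d (by simp)) seen level (hnm d (by simp)).1 (hnm d (by simp)).2]
    rw [ih (List.nodup_cons.mp hnd).2 (fun dx h => hlt dx (by simp [h])) _ _ (fun dx h => by
      have hxlt := hlt dx (by simp [h])
      constructor <;> intro hmem <;> rcases List.mem_append.mp hmem with hA | hB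
      · exact (hnm dx (by simp [h])).1 hA
      · rcases List.mem_cons.mp hB with hB1 | hB1
        · injection hB1 with hx hy
          exact (List.nodup_cons.mp hnd).1 (hx ▸ h)
        · have hB' := List.mem_singleton.mp hB1
          injection hB' with hx hy
          omega
      · exact (hnm dx (by simp [h])).2 hA
      · rcases List.mem_cons.mp hB with hB1 | hB1
        · injection hB1 with hx hy
          omega
        · have hB' := List.mem_singleton.mp hB1
          injection hB' with hx hy
          exact (List.nodup_cons.mp hnd).1 (hx ▸ h))]
    simp

lemma pv_ring_fold (r : Int) (hr : 0 ≤ r) (seen : PySem.Set (Int × Int))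
    (hseen : ∀ a b : Int, (a, b) ∈ seen ↔ max |a| |b| < r) :
    (PySem.List.pyRange (-r) (r + 1) 1).foldl (pvRStep r) (seen, ([] : List (Int × Int)))
      = (seen ++ pvRing r, pvRing r) := by
  rcases eq_or_lt_of_le hr with h0 | h0
  · obtain rfl : r = 0 := h0.symm
    have e : PySem.List.pyRange (-(0 : Int)) (0 + 1) 1 = [(0 : Int)] := by
      rw [neg_zero]; exact PySem.List.pyRange_one_singleton 0
    have hn : ((0 : Int), (0 : Int)) ∉ seen := fun h => by
      have := (hseen 0 0).mp h; simp at this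
    rw [e]
    simp only [List.foldl_cons, List.foldl_nil]
    unfold pvRStep
    rw [e]
    have hcond : max |(0 : Int)| |(0 : Int)| = 0 ∧ ((0 : Int), (0 : Int)) ∉ seen := ⟨by simp, hn⟩
    simp only [List.foldl_cons, List.foldl_nil, pvStep, if_pos hcond]
    simp [PySem.Set.add, hn, pvRing]
  · have e : PySem.List.pyRange (-r) (r + 1) 1
        = [-r] ++ PySem.List.pyRange (-r + 1) r 1 ++ [r] := by
      rw [PySem.List.pyRange_one_succ_right (by omega), PySem.List.pyRange_one_cons (by omega)]
      simp
    rw [e, List.foldl_append, List.foldl_append]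
    have s1 : List.foldl (pvRStep r) ((seen, ([] : List (Int × Int)))) [-r]
        = (seen ++ (PySem.List.pyRange (-r) (r + 1) 1).map (fun dy => (-r, dy)),
           (PySem.List.pyRange (-r) (r + 1) 1).map (fun dy => (-r, dy))) := by
      simp only [List.foldl_cons, List.foldl_nil]
      unfold pvRStep
      have := pv_dy_all r (-r) (by simp only [pv_abs]; omega)
        (PySem.List.pyRange (-r) (r + 1) 1) seen []
        (fun dy h => by
          have := PySem.List.mem_pyRange_one.mp h
          simp only [pv_abs]; omega)
        (fun dy h hm => by
          have := (hseen (-r) dy).mp hm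
          simp only [pv_abs] at this; omega)
        (PySem.List.nodup_pyRange_one _ _)
      simpa using this
    rw [s1]
    have s2 := pv_mid_fold r (by omega) (PySem.List.pyRange (-r + 1) r 1)
      (PySem.List.nodup_pyRange_one _ _)
      (fun dx h => by
        have := PySem.List.mem_pyRange_one.mp h
        simp only [pv_abs]; omega)
      (seen ++ (PySem.List.pyRange (-r) (r + 1) 1).map (fun dy => (-r, dy)))
      ((PySem.List.pyRange (-r) (r + 1) 1).map (fun dy => (-r, dy)))
      (fun dx h => by
        have hb := PySem.List.mem_pyRange_one.mp h
        constructor <;> intro hm <;> rcases List.mem_append.mp hm with hA | hB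
        · have := (hseen dx (-r)).mp hA
          simp only [pv_abs] at this; omega
        · rcases List.mem_map.mp hB with ⟨dy, hdy, hEq⟩
          injection hEq with hx hy
          omega
        · have := (hseen dx r).mp hA
          simp only [pv_abs] at this; omega
        · rcases List.mem_map.mp hB with ⟨dy, hdy, hEq⟩
          injection hEq with hx hy
          omega)
    rw [s2]
    have s3 : List.foldl (pvRStep r)
        ((seen ++ (PySem.List.pyRange (-r) (r + 1) 1).map (fun dy => (-r, dy)))
          ++ (PySem.List.pyRange (-r + 1) r 1).flatMap (fun dx => [(dx, -r), (dx, r)]),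
         (PySem.List.pyRange (-r) (r + 1) 1).map (fun dy => (-r, dy))
          ++ (PySem.List.pyRange (-r + 1) r 1).flatMap (fun dx => [(dx, -r), (dx, r)])) [r]
        = ((seen ++ (PySem.List.pyRange (-r) (r + 1) 1).map (fun dy => (-r, dy))
            ++ (PySem.List.pyRange (-r + 1) r 1).flatMap (fun dx => [(dx, -r), (dx, r)]))
            ++ (PySem.List.pyRange (-r) (r + 1) 1).map (fun dy => (r, dy)),
           ((PySem.List.pyRange (-r) (r + 1) 1).map (fun dy => (-r, dy))
            ++ (PySem.List.pyRange (-r + 1) r 1).flatMap (fun dx => [(dx, -r), (dx, r)]))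
            ++ (PySem.List.pyRange (-r) (r + 1) 1).map (fun dy => (r, dy))) := by
      simp only [List.foldl_cons, List.foldl_nil]
      unfold pvRStep
      exact pv_dy_all r r (by simp only [pv_abs]; omega) (PySem.List.pyRange (-r) (r + 1) 1) _ _
        (fun dy h => by
          have := PySem.List.mem_pyRange_one.mp h
          simp only [pv_abs]; omega)
        (fun dy h hm => by
          rcases List.mem_append.mp hm with hA | hB
          · rcases List.mem_append.mp hA with hA1 | hA2
            · have := (hseen r dy).mp hA1
              simp only [pv_abs] at this; omega
            · rcases List.mem_map.mp hA2 with ⟨dy', hdy', hEq⟩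
              injection hEq with hx hy
              omega
          · rcases List.mem_flatMap.mp hB with ⟨dx, hdx, hmem2⟩
            have hdb := PySem.List.mem_pyRange_one.mp hdx
            rcases List.mem_cons.mp hmem2 with hB1 | hB1
            · injection hB1 with hx hy
              omega
            · have hB' := List.mem_singleton.mp hB1
              injection hB' with hx hy
              omega)
        (PySem.List.nodup_pyRange_one _ _)
    rw [s3, pvRing, if_neg (by omega : ¬ r = 0)]
    simp [List.append_assoc]

lemma pv_outer (n : Nat) :
    (PySem.List.pyRange 0 (n : Int) 1).foldl
      (fun st r =>
        let inner := (PySem.List.pyRange (-r) (r + 1) 1).foldl (pvRStep r)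
          (st.1, ([] : List (Int × Int)))
        (inner.1, st.2 ++ [inner.2]))
      ((PySem.Set.empty : PySem.Set (Int × Int)), ([] : List (List (Int × Int))))
      = ((PySem.List.pyRange 0 (n : Int) 1).flatMap pvRing,
         (PySem.List.pyRange 0 (n : Int) 1).map pvRing) := by
  induction n with
  | zero =>
    rw [show ((0 : Nat) : Int) = 0 by simp, PySem.List.pyRange_one_eq_nil (by omega)]
    rfl
  | succ n ih =>
    have e : PySem.List.pyRange 0 ((n + 1 : Nat) : Int) 1
        = PySem.List.pyRange 0 (n : Int) 1 ++ [(n : Int)] := by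
      push_cast
      exact PySem.List.pyRange_one_succ_right (by positivity)
    rw [e, List.foldl_append, ih, List.map_append, List.flatMap_append]
    simp only [List.foldl_cons, List.foldl_nil]
    have hseen : ∀ a b : Int,
        (a, b) ∈ (PySem.List.pyRange 0 (n : Int) 1).flatMap pvRing ↔
          max |a| |b| < (n : Int) := by
      intro a b
      constructor
      · intro h
        rcases List.mem_flatMap.mp h with ⟨r, hr, hp⟩
        have hr' := PySem.List.mem_pyRange_one.mp hr
        have := (pvRing_mem r hr'.1 a b).mp hp
        omega
      · intro h
        refine List.mem_flatMap.mpr ⟨max |a| |b|, ?_, ?_⟩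
        · refine PySem.List.mem_pyRange_one.mpr ⟨?_, h⟩
          simp only [pv_abs]; omega
        · exact (pvRing_mem _ (by simp only [pv_abs]; omega) a b).mpr rfl
    have hrf := pv_ring_fold (n : Int) (by positivity) _ hseen
    rw [hrf]
    simp

-- B's fold step, named (proof-side only; defeq to the lambda in the port)
def pvBStep (levels : List (List (Int × Int))) (r : Int) : List (List (Int × Int)) :=
  if r = 0 then levels ++ [[((0 : Int), (0 : Int))]]
  else
    let level0 := (PySem.List.pyRange (-r) (r + 1) 1).map (fun dy => (-r, dy))
    let level1 := (PySem.List.pyRange (-r + 1) r 1).foldl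
      (fun lv dx => (lv ++ [(dx, -r)]) ++ [(dx, r)]) level0
    let level := level1 ++ (PySem.List.pyRange (-r) (r + 1) 1).map (fun dy => (r, dy))
    levels ++ [level]

lemma pv_alt_step (levels : List (List (Int × Int))) (r : Int) :
    pvBStep levels r = levels ++ [pvRing r] := by
  unfold pvBStep
  by_cases h : r = 0
  · simp [h, pvRing]
  · simp only [if_neg h]
    simp [pvRing, h, List.append_assoc, List.flatMap_def]

lemma pv_alt_fold (l : List Int) :
    ∀ acc : List (List (Int × Int)), l.foldl pvBStep acc = acc ++ l.map pvRing := by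
  induction l with
  | nil => intro acc; simp
  | cons a l ih =>
    intro acc
    rw [List.foldl_cons, show pvBStep acc a = acc ++ [pvRing a] from pv_alt_step acc a,
      ih (acc ++ [pvRing a])]
    simp

lemma pv_alt_eq (range_cells : Int) :
    generate_circle_offsets_py_alt range_cells
      = (PySem.List.pyRange 0 (range_cells + 1) 1).map pvRing := by
  unfold generate_circle_offsets_py_alt
  show (PySem.List.pyRange 0 (range_cells + 1) 1).foldl pvBStep [] = _
  exact (pv_alt_fold (PySem.List.pyRange 0 (range_cells + 1) 1) []).trans (by simp)

-- ===== VERDICT (by name: the statement is the Claim_ definition above) =====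
theorem generate_circle_offsets_py_spec : Claim_equal_generate_circle_offsets_py := by
  intro range_cells _
  unfold Spec_generate_circle_offsets_py
  rw [pv_alt_eq]
  unfold generate_circle_offsets_py
  by_cases h : range_cells + 1 ≤ 0
  · rw [PySem.List.pyRange_one_eq_nil h]
    rfl
  · have hn : ((range_cells + 1).toNat : Int) = range_cells + 1 := Int.toNat_of_nonneg (by omega)
    have hout := pv_outer (range_cells + 1).toNat
    rw [hn] at hout
    exact congrArg Prod.snd hout
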